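-- pv_equiv track=rewrite | github.com/Today-to-Lsp/Personal-Repo | proto_scan.py | split_categories
-- ===== SOURCE A (Python) =====
-- def split_categories(rows):
--     cats = {"http_https": [], "ws_wss": [], "non_web": [], "all": rows}
--     for r in rows:
--         if r["proto"] in ("HTTP", "HTTPS"):
--             cats["http_https"].append(r)
--         elif r["proto"] in ("WS", "WSS"):
--             cats["ws_wss"].append(r)
--         else:
--             cats["non_web"].append(r)
--     return cats
-- ===== SOURCE B (Python) =====
-- def split_categories(rows):
--     web = ("HTTP", "HTTPS")
--     sock = ("WS", "WSS")
--     return {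
--         "http_https": [r for r in rows if r["proto"] in web],
--         "ws_wss": [r for r in rows if r["proto"] in sock],
--         "non_web": [r for r in rows if r["proto"] not in web + sock],
--         "all": rows,
--     }
-- ===== Notes on version B (the rewrite author's own statement) =====
-- stated objective: alternative
-- what changed: Replaces the single accumulating loop with three branches by three independent filtering passes over rows (one comprehension per bucket), assembling the result dict directly.
import Mathlib
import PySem

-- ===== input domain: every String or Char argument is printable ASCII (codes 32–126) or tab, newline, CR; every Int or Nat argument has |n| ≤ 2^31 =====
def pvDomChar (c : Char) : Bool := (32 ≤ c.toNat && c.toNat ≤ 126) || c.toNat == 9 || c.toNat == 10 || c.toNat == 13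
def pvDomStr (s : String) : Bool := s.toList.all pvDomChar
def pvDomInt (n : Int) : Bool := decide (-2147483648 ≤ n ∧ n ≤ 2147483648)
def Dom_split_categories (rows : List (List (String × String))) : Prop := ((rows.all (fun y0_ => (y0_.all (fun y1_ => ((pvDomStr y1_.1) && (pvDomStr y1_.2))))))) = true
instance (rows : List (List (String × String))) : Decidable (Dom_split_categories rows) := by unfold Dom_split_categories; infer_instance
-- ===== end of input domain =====

-- B buckets rows by three independent filtering passes (one per category) instead of A's single accumulating loop; same O(n) cost, different decomposition.


-- shared helper: r["proto"] = first value under key "proto" (Pre_ guarantees it exists;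
-- the "" default is never reached inside Pre_, where Python would raise KeyError)
def pvProto (r : List (String × String)) : String :=
  ((r.find? (fun kv => kv.1 == "proto")).map (·.2)).getD ""

-- ===== PORT A =====
-- one loop, three accumulators, branch order as in the Python if/elif/else
def pvStepA (st : List (List (String × String)) × List (List (String × String)) × List (List (String × String))) (r : List (String × String)) : List (List (String × String)) × List (List (String × String)) × List (List (String × String)) :=
  let p := pvProto r
  if p == "HTTP" || p == "HTTPS" then (st.1 ++ [r], st.2.1, st.2.2)
  else if p == "WS" || p == "WSS" then (st.1, st.2.1 ++ [r], st.2.2)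
  else (st.1, st.2.1, st.2.2 ++ [r])

def split_categories (rows : List (List (String × String))) : List (String × List (List (String × String))) :=
  let st := rows.foldl pvStepA ([], [], [])
  [("http_https", st.1), ("ws_wss", st.2.1), ("non_web", st.2.2), ("all", rows)]

-- ===== PORT B =====
-- three independent filtering passes, one per bucket (Source B's comprehensions)
def pvIsWeb (r : List (String × String)) : Bool := pvProto r == "HTTP" || pvProto r == "HTTPS"
def pvIsSock (r : List (String × String)) : Bool := pvProto r == "WS" || pvProto r == "WSS"

def split_categories_alt (rows : List (List (String × String))) : List (String × List (List (String × String))) :=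
  [("http_https", rows.filter pvIsWeb),
   ("ws_wss", rows.filter pvIsSock),
   ("non_web", rows.filter (fun r => !(pvIsWeb r || pvIsSock r))),
   ("all", rows)]

-- ===== PRECONDITION & SPEC =====
-- Pre_: every row carries a "proto" key; on a row without it Python A (and B) raise KeyError.
def Pre_split_categories (rows : List (List (String × String))) : Prop :=
  (rows.all (fun r => r.any (fun kv => kv.1 == "proto"))) = true
instance (rows : List (List (String × String))) : Decidable (Pre_split_categories rows) := by unfold Pre_split_categories; infer_instance
def pvWitness_split_categories : (List (List (String × String))) := [[("proto", "HTTP")], [("proto", "FTP")]]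

def Spec_split_categories (rows : List (List (String × String))) (out : List (String × List (List (String × String)))) : Prop := out = split_categories_alt rows
instance (rows : List (List (String × String))) (out : List (String × List (List (String × String)))) : Decidable (Spec_split_categories rows out) := by unfold Spec_split_categories; infer_instance

-- ===== CLAIM (what is proved, stated in full; the proofs are below) =====
def Claim_equal_split_categories : Prop := ∀ (rows : List (List (String × String))), Dom_split_categories rows → Pre_split_categories rows → Spec_split_categories rows (split_categories rows)

-- ===== LEMMAS AND PROOFS =====
lemma split_categories_foldl (rows : List (List (String × String)))
    (h w n : List (List (String × String))) :
    rows.foldl pvStepA (h, w, n)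
    = (h ++ rows.filter pvIsWeb, w ++ rows.filter pvIsSock,
       n ++ rows.filter (fun r => !(pvIsWeb r || pvIsSock r))) := by
  induction rows generalizing h w n with
  | nil => simp
  | cons r rs ih =>
    rw [List.foldl_cons]
    by_cases hweb : (pvProto r == "HTTP" || pvProto r == "HTTPS") = true
    · have hwebb : pvIsWeb r = true := hweb
      have hs : pvIsSock r = false := by
        rcases (by simpa using hweb : pvProto r = "HTTP" ∨ pvProto r = "HTTPS") with h1 | h1 <;>
          simp [pvIsSock, h1]
      have hst : pvStepA (h, w, n) r = (h ++ [r], w, n) := by simp [pvStepA, hweb]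
      rw [hst, ih]
      simp [List.filter_cons, hwebb, hs]
    · have hwebb : pvIsWeb r = false := eq_false_of_ne_true hweb
      by_cases hsock : (pvProto r == "WS" || pvProto r == "WSS") = true
      · have hsockb : pvIsSock r = true := hsock
        have hst : pvStepA (h, w, n) r = (h, w ++ [r], n) := by simp [pvStepA, hweb, hsock]
        rw [hst, ih]
        simp [hwebb, hsockb]
      · have hsockb : pvIsSock r = false := eq_false_of_ne_true hsock
        have hst : pvStepA (h, w, n) r = (h, w, n ++ [r]) := by simp [pvStepA, hweb, hsock]
        rw [hst, ih]
        simp [hwebb, hsockb]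

-- ===== VERDICT (by name: the statement is the Claim_ definition above) =====
theorem split_categories_spec : Claim_equal_split_categories := by
  intro rows _ _
  show split_categories rows = split_categories_alt rows
  unfold split_categories split_categories_alt
  rw [split_categories_foldl]
  simp
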